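-- pv_equiv track=rewrite | github.com/LucaTheSorcerer/PythonUniProjects | S5/exercises/exercise_3.py | add_all_elements_from_matrix_to_list
-- ===== SOURCE A (Python) =====
-- def matrix_is_sorted(list):
--     for i in range(1, len(list)):
--         if list[i-1] > list[i]:
--             return False
--     return True
--
-- def add_all_elements_from_matrix_to_list(matrix):
--     new_list = []
--     for i in range(len(matrix)):
--         if i % 2 == 0:
--             for j in range(len(matrix)):
--                 new_list.append(matrix[i][j])
--         else:
--             for j in range(len(matrix)-1, -1, -1):
--                 new_list.append(matrix[i][j])
--
--     if matrix_is_sorted(new_list):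
--         return True
--     else:
--         return False
-- ===== SOURCE B (Python) =====
-- def add_all_elements_from_matrix_to_list(matrix):
--     n = len(matrix)
--     prev = None
--     for i in range(n):
--         cols = range(n) if i % 2 == 0 else range(n - 1, -1, -1)
--         for j in cols:
--             x = matrix[i][j]
--             if prev is not None and prev > x:
--                 return False
--             prev = x
--     return True
-- ===== Notes on version B (the rewrite author's own statement) =====
-- stated objective: simpler
-- what changed: B fuses the snake flatten and the sortedness scan into one streaming pass that keeps only the previous element and returns False early, instead of building an intermediate list and re-scanning it by index.
import Mathlib
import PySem

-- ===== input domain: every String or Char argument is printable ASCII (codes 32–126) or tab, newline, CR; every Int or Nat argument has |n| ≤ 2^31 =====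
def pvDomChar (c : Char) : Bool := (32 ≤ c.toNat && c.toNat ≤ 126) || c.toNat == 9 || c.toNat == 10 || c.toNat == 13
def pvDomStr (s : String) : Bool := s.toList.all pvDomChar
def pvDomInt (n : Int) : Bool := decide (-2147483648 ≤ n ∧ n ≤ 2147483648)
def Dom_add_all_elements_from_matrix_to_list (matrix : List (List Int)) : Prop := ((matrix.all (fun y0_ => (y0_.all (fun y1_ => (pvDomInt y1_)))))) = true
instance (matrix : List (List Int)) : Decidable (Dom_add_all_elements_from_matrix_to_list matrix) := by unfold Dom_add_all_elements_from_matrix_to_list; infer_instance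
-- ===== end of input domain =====

-- B fuses the snake flatten and the sortedness check into one streaming pass (simpler: no intermediate list).

-- ===== PORT A =====
def matrix_is_sorted_loop (l : List Int) : List Int → Bool
  | [] => true
  | i :: rest =>
    if PySem.List.pyGetD l (i - 1) 0 > PySem.List.pyGetD l i 0 then false
    else matrix_is_sorted_loop l rest

def matrix_is_sorted (l : List Int) : Bool :=
  matrix_is_sorted_loop l (PySem.List.pyRange 1 (l.length : Int) 1)

def add_all_elements_from_matrix_to_list (matrix : List (List Int)) : Bool :=
  let n : Int := matrix.length
  let new_list : List Int :=
    (PySem.List.pyRange 0 n 1).foldl (fun acc i =>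
      if i % 2 == 0 then
        (PySem.List.pyRange 0 n 1).foldl
          (fun a j => a ++ [PySem.List.pyGetD (PySem.List.pyGetD matrix i []) j 0]) acc
      else
        (PySem.List.pyRange (n - 1) (-1) (-1)).foldl
          (fun a j => a ++ [PySem.List.pyGetD (PySem.List.pyGetD matrix i []) j 0]) acc) []
  if matrix_is_sorted new_list then true else false

-- ===== PORT B =====
-- 'prev is not None and prev > x'
def pvViol (prev : Option Int) (x : Int) : Bool :=
  match prev with | some p => decide (p > x) | none => false

-- inner loop over the chosen column order; returns none for the early 'return False'
def bRowLoop (matrix : List (List Int)) (i : Int) : Option Int → List Int → Option (Option Int)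
  | prev, [] => some prev
  | prev, j :: rest =>
    let x := PySem.List.pyGetD (PySem.List.pyGetD matrix i []) j 0
    if pvViol prev x then none
    else bRowLoop matrix i (some x) rest

def bRowsLoop (matrix : List (List Int)) (n : Int) : Option Int → List Int → Bool
  | _, [] => true
  | prev, i :: rest =>
    let cols := if i % 2 == 0 then PySem.List.pyRange 0 n 1
                else PySem.List.pyRange (n - 1) (-1) (-1)
    match bRowLoop matrix i prev cols with
    | none => false
    | some p => bRowsLoop matrix n p rest

def add_all_elements_from_matrix_to_list_alt (matrix : List (List Int)) : Bool :=
  let n : Int := matrix.length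
  bRowsLoop matrix n none (PySem.List.pyRange 0 n 1)

-- ===== PRECONDITION & SPEC =====
-- Pre_ excludes exactly the inputs where the Python A raises IndexError:
-- matrices with a row shorter than the number of rows (A indexes matrix[i][j] for j < len(matrix)).
def Pre_add_all_elements_from_matrix_to_list (matrix : List (List Int)) : Prop :=
  ∀ row ∈ matrix, matrix.length ≤ row.length
instance (matrix : List (List Int)) : Decidable (Pre_add_all_elements_from_matrix_to_list matrix) := by unfold Pre_add_all_elements_from_matrix_to_list; infer_instance

def pvWitness_add_all_elements_from_matrix_to_list : List (List Int) := [[1, 2], [4, 3]]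

def Spec_add_all_elements_from_matrix_to_list (matrix : List (List Int)) (out : Bool) : Prop := out = add_all_elements_from_matrix_to_list_alt matrix
instance (matrix : List (List Int)) (out : Bool) : Decidable (Spec_add_all_elements_from_matrix_to_list matrix out) := by unfold Spec_add_all_elements_from_matrix_to_list; infer_instance

-- ===== CLAIM (what is proved, stated in full; the proofs are below) =====
def Claim_equal_add_all_elements_from_matrix_to_list : Prop := ∀ (matrix : List (List Int)), Dom_add_all_elements_from_matrix_to_list matrix → Pre_add_all_elements_from_matrix_to_list matrix → Spec_add_all_elements_from_matrix_to_list matrix (add_all_elements_from_matrix_to_list matrix)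

-- ===== LEMMAS AND PROOFS =====

-- the snake column order of row i, and its element sequence
def pvCols (n i : Int) : List Int :=
  if i % 2 == 0 then PySem.List.pyRange 0 n 1 else PySem.List.pyRange (n - 1) (-1) (-1)

def pvRowSeq (matrix : List (List Int)) (n i : Int) : List Int :=
  (pvCols n i).map (fun j => PySem.List.pyGetD (PySem.List.pyGetD matrix i []) j 0)

-- streaming sortedness check: some prev = still sorted, none = violation found
def pvSeq' : Option Int → List Int → Option (Option Int)
  | prev, [] => some prev
  | prev, x :: rest =>
    if pvViol prev x then none
    else pvSeq' (some x) rest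

def pvSeqB (prev : Option Int) (l : List Int) : Bool := (pvSeq' prev l).isSome

theorem pvSeq'_append (xs : List Int) : ∀ (prev : Option Int) (ys : List Int),
    pvSeq' prev (xs ++ ys) = (pvSeq' prev xs).bind (fun q => pvSeq' q ys) := by
  induction xs with
  | nil => intro prev ys; rfl
  | cons x t ih =>
    intro prev ys
    simp only [List.cons_append, pvSeq']
    split
    · rfl
    · exact ih (some x) ys

theorem bRowLoop_eq (matrix : List (List Int)) (i : Int) (js : List Int) :
    ∀ prev, bRowLoop matrix i prev js
      = pvSeq' prev (js.map (fun j => PySem.List.pyGetD (PySem.List.pyGetD matrix i []) j 0)) := by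
  induction js with
  | nil => intro prev; rfl
  | cons j t ih =>
    intro prev
    simp only [List.map_cons, bRowLoop, pvSeq']
    split
    · rfl
    · exact ih _

theorem bRowsLoop_eq (matrix : List (List Int)) (n : Int) (is_ : List Int) :
    ∀ prev, bRowsLoop matrix n prev is_ = pvSeqB prev (is_.flatMap (pvRowSeq matrix n)) := by
  induction is_ with
  | nil => intro prev; rfl
  | cons i t ih =>
    intro prev
    simp only [List.flatMap_cons, bRowsLoop, pvSeqB, pvSeq'_append, bRowLoop_eq,
      pvRowSeq, pvCols]
    rcases pvSeq' prev ((if (i % 2 == 0) = true then PySem.List.pyRange 0 n 1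
        else PySem.List.pyRange (n - 1) (-1) (-1)).map
        (fun j => PySem.List.pyGetD (PySem.List.pyGetD matrix i []) j 0)) with _ | p
    · rfl
    · simp only [Option.bind_some]; exact ih p

-- A's new_list is the flatMap of the row sequences
theorem newList_eq (matrix : List (List Int)) (n : Int) :
    (PySem.List.pyRange 0 n 1).foldl (fun acc i =>
      if i % 2 == 0 then
        (PySem.List.pyRange 0 n 1).foldl
          (fun a j => a ++ [PySem.List.pyGetD (PySem.List.pyGetD matrix i []) j 0]) acc
      else
        (PySem.List.pyRange (n - 1) (-1) (-1)).foldl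
          (fun a j => a ++ [PySem.List.pyGetD (PySem.List.pyGetD matrix i []) j 0]) acc) []
    = (PySem.List.pyRange 0 n 1).flatMap (pvRowSeq matrix n) := by
  have h : ∀ (acc : List Int) (i : Int),
      (if i % 2 == 0 then
        (PySem.List.pyRange 0 n 1).foldl
          (fun a j => a ++ [PySem.List.pyGetD (PySem.List.pyGetD matrix i []) j 0]) acc
      else
        (PySem.List.pyRange (n - 1) (-1) (-1)).foldl
          (fun a j => a ++ [PySem.List.pyGetD (PySem.List.pyGetD matrix i []) j 0]) acc)
      = acc ++ pvRowSeq matrix n i := by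
    intro acc i
    simp only [pvRowSeq, pvCols, PySem.List.foldl_append_singleton_eq_map]
    split <;> rfl
  rw [show (fun (acc : List Int) (i : Int) =>
      if i % 2 == 0 then
        (PySem.List.pyRange 0 n 1).foldl
          (fun a j => a ++ [PySem.List.pyGetD (PySem.List.pyGetD matrix i []) j 0]) acc
      else
        (PySem.List.pyRange (n - 1) (-1) (-1)).foldl
          (fun a j => a ++ [PySem.List.pyGetD (PySem.List.pyGetD matrix i []) j 0]) acc)
      = (fun acc i => acc ++ pvRowSeq matrix n i) from
      funext fun acc => funext fun i => h acc i]
  simpa using PySem.List.foldl_append_eq_flatMap (pvRowSeq matrix n) (PySem.List.pyRange 0 n 1) []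

-- the index-based sorted check equals the streaming check
theorem sorted_loop_eq (l : List Int) :
    ∀ (m k : Nat), 1 ≤ k → k + m = l.length →
      matrix_is_sorted_loop l (PySem.List.pyRange (k : Int) (l.length : Int) 1)
        = pvSeqB (some (l.getD (k - 1) 0)) (l.drop k) := by
  intro m
  induction m with
  | zero =>
    intro k hk hlen
    have hkl : (k : Int) = (l.length : Int) := by omega
    rw [hkl, PySem.List.pyRange_one_eq_nil le_rfl]
    have : l.drop k = [] := List.drop_eq_nil_of_le (by omega)
    simp [matrix_is_sorted_loop, this, pvSeqB, pvSeq']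
  | succ m ih =>
    intro k hk hlen
    have hklt : k < l.length := by omega
    rw [PySem.List.pyRange_one_cons (by exact_mod_cast hklt)]
    simp only [matrix_is_sorted_loop]
    have h1 : PySem.List.pyGetD l ((k : Int) - 1) 0 = l.getD (k - 1) 0 := by
      have : (k : Int) - 1 = ((k - 1 : Nat) : Int) := by omega
      rw [this, PySem.List.pyGetD_natCast]
    have h2 : PySem.List.pyGetD l (k : Int) 0 = l[k] := by
      rw [PySem.List.pyGetD_natCast]; exact List.getD_eq_getElem l 0 hklt
    have hdrop : l.drop k = l[k] :: l.drop (k + 1) := List.drop_eq_getElem_cons hklt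
    rw [h1, h2, hdrop]
    by_cases hc : l.getD (k - 1) 0 > l[k]
    · rw [if_pos hc]
      simp only [pvSeqB, pvSeq']
      rw [if_pos (by simp only [pvViol, decide_eq_true_eq]; exact hc)]
      rfl
    · have e1 : ((k : Int) + 1) = ((k + 1 : Nat) : Int) := by omega
      rw [if_neg hc, e1, ih (k + 1) (by omega) (by omega)]
      have e2 : l.getD (k + 1 - 1) 0 = l[k] := by
        simp only [Nat.add_sub_cancel]; exact List.getD_eq_getElem l 0 hklt
      rw [e2]
      simp only [pvSeqB, pvSeq']
      rw [if_neg (by simp only [pvViol, decide_eq_true_eq]; exact hc)]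

theorem matrix_is_sorted_eq (l : List Int) : matrix_is_sorted l = pvSeqB none l := by
  cases l with
  | nil => rfl
  | cons x t =>
    unfold matrix_is_sorted
    have := sorted_loop_eq (x :: t) t.length 1 le_rfl (by simp [Nat.add_comm])
    simp only [Nat.sub_self, Nat.cast_one] at this
    rw [this]
    simp [pvSeqB, pvSeq', pvViol]

-- ===== VERDICT (by name: the statement is the Claim_ definition above) =====
theorem add_all_elements_from_matrix_to_list_spec : Claim_equal_add_all_elements_from_matrix_to_list := by
  intro matrix _ _
  unfold Spec_add_all_elements_from_matrix_to_list
  unfold add_all_elements_from_matrix_to_list add_all_elements_from_matrix_to_list_alt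
  simp only [newList_eq, bRowsLoop_eq, matrix_is_sorted_eq]
  split <;> simp_all
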